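-- pv_equiv track=rewrite | github.com/smcgeary/agorbns | general/RBNS_methods.py | get_all_mismatches
-- ===== SOURCE A (Python) =====
-- def get_all_mismatches(kmer, internal_only=True):
--     nts = ["A", "C", "G", "T"]
--     # Assign the length of the output and the range of the loop based on whether
--     # or not the ends are being considered with respect to the mismatches.
--     if internal_only:
--         p_l, p_r = (1, len(kmer) - 1)
--         len_out = len(kmer) - 2
--         i_shift = -1
--     else:
--         p_l, p_r = (0, len(kmer))
--         len_out = len(kmer)
--         i_shift = 0
--     # Pre-allocate the output lists.
--     mm_kmers = [None]*len_out
--     mm_pos = [None]*len_out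
--     mm_nts = [None]*len_out
--     mm_mmnts = [None]*len_out
--     for i in range(p_l, p_r):
--         nt = kmer[i]
--         mms = [j for j in nts if j != nt]
--         mismatches = [kmer[:i] + mm + kmer[i+1:] for mm in mms]
--         mm_kmers[i + i_shift] = [kmer[:i] + mm + kmer[i+1:] for mm in mms]
--         mm_pos[i + i_shift] = [i for mm in mms]
--         mm_nts[i + i_shift] = [nt for mm in mms]
--         mm_mmnts[i + i_shift] = [mm for mm in mms]
--     mm_kmers = [j for i in mm_kmers for j in i]
--     mm_pos = [j for i in mm_pos for j in i]
--     mm_nts = [j for i in mm_nts for j in i]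
--     mm_mmnts = [j for i in mm_mmnts for j in i]
--     return(list(zip(mm_kmers, mm_pos, mm_nts, mm_mmnts)))
-- ===== SOURCE B (Python) =====
-- def get_all_mismatches(kmer, internal_only=True):
--     # Same index window as A, but build the result rows directly in one flat
--     # loop instead of filling four pre-allocated column lists and zipping them.
--     if internal_only:
--         p_l, p_r = 1, len(kmer) - 1
--     else:
--         p_l, p_r = 0, len(kmer)
--     out = []
--     for i in range(p_l, p_r):
--         nt = kmer[i]
--         for mm in ["A", "C", "G", "T"]:
--             if mm != nt:
--                 out.append((kmer[:i] + mm + kmer[i+1:], i, nt, mm))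
--     return out
-- ===== Notes on version B (the rewrite author's own statement) =====
-- stated objective: simpler
-- what changed: B builds the result tuples directly in one flat loop over positions (append row-by-row), replacing A's four pre-allocated column lists with i_shift indexing, four flatten comprehensions and the final zip transpose.
import Mathlib
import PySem

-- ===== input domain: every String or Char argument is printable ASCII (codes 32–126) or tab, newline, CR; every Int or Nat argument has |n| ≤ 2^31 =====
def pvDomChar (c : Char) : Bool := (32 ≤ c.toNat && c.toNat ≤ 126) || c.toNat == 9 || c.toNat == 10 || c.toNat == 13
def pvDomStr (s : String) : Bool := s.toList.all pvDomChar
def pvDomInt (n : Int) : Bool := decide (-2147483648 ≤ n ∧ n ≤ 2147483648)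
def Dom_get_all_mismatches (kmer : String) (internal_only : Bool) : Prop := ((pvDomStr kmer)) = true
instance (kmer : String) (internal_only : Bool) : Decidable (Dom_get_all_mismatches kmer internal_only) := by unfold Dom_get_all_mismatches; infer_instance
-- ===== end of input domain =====

-- B replaces A's four pre-allocated column lists + flatten + zip transpose by direct
-- row-by-row construction in one flat loop (objective: simpler; same asymptotic cost).


-- ===== PORT A =====
-- Literal port of A. Strings are handled as their List Char with String.ofList at the end
-- (PySem.Str slicing is a thin wrapper over the same PySem.List operations).
def get_all_mismatches (kmer : String) (internal_only : Bool) : List (String × Int × String × String) :=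
  let cs : List Char := kmer.toList
  let nts : List String := ["A", "C", "G", "T"]
  let p_l : Int := if internal_only then 1 else 0
  let p_r : Int := if internal_only then (cs.length : Int) - 1 else (cs.length : Int)
  let len_out : Int := if internal_only then (cs.length : Int) - 2 else (cs.length : Int)
  let i_shift : Int := if internal_only then -1 else 0
  -- [None]*len_out: Python list repetition clamps a negative count to 0, as Int.toNat does
  let st0 : List (Option (List String)) × List (Option (List Int)) × List (Option (List String)) × List (Option (List String)) :=
    (List.replicate len_out.toNat none, List.replicate len_out.toNat none,
     List.replicate len_out.toNat none, List.replicate len_out.toNat none)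
  let st := (PySem.List.pyRange p_l p_r 1).foldl (fun s i =>
    -- kmer[i]: i ∈ range(p_l, p_r) is always in range, so pyGet? is never none here
    let nt : String := String.ofList [((PySem.List.pyGet? cs i).getD 'A')]
    let mms : List String := nts.filter (fun j => j != nt)
    let _mismatches : List String := mms.map (fun mm =>
      String.ofList (PySem.List.slice cs none (some i) ++ mm.toList ++ PySem.List.slice cs (some (i + 1)) none))
    -- lst[i + i_shift] = …: the index is always in range here (pySetD is the total form)
    (PySem.List.pySetD s.1 (i + i_shift) (some (mms.map (fun mm =>
        String.ofList (PySem.List.slice cs none (some i) ++ mm.toList ++ PySem.List.slice cs (some (i + 1)) none)))),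
     PySem.List.pySetD s.2.1 (i + i_shift) (some (mms.map (fun _ => i))),
     PySem.List.pySetD s.2.2.1 (i + i_shift) (some (mms.map (fun _ => nt))),
     PySem.List.pySetD s.2.2.2 (i + i_shift) (some (mms.map (fun mm => mm))))) st0
  -- [j for i in L for j in i]: every slot was assigned, None is unreachable
  let mm_kmers := st.1.flatMap (fun o => o.getD [])
  let mm_pos := st.2.1.flatMap (fun o => o.getD [])
  let mm_nts := st.2.2.1.flatMap (fun o => o.getD [])
  let mm_mmnts := st.2.2.2.flatMap (fun o => o.getD [])
  List.zip mm_kmers (List.zip mm_pos (List.zip mm_nts mm_mmnts))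

-- ===== PORT B =====
def get_all_mismatches_alt (kmer : String) (internal_only : Bool) : List (String × Int × String × String) :=
  let cs : List Char := kmer.toList
  let p_l : Int := if internal_only then 1 else 0
  let p_r : Int := if internal_only then (cs.length : Int) - 1 else (cs.length : Int)
  (PySem.List.pyRange p_l p_r 1).foldl (fun out i =>
    -- kmer[i]: always in range for i ∈ range(p_l, p_r)
    let nt : String := String.ofList [((PySem.List.pyGet? cs i).getD 'A')]
    ["A", "C", "G", "T"].foldl (fun out mm =>
      if mm != nt then
        out ++ [(String.ofList (PySem.List.slice cs none (some i) ++ mm.toList ++ PySem.List.slice cs (some (i + 1)) none), i, nt, mm)]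
      else out) out) []

-- ===== PRECONDITION & SPEC =====
def Spec_get_all_mismatches (kmer : String) (internal_only : Bool) (out : List (String × Int × String × String)) : Prop := out = get_all_mismatches_alt kmer internal_only
instance (kmer : String) (internal_only : Bool) (out : List (String × Int × String × String)) : Decidable (Spec_get_all_mismatches kmer internal_only out) := by unfold Spec_get_all_mismatches; infer_instance

-- ===== CLAIM (what is proved, stated in full; the proofs are below) =====
def Claim_equal_get_all_mismatches : Prop := ∀ (kmer : String) (internal_only : Bool), Dom_get_all_mismatches kmer internal_only → Spec_get_all_mismatches kmer internal_only (get_all_mismatches kmer internal_only)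

-- ===== LEMMAS AND PROOFS =====

-- the shared row data (what both programs compute at position i)
def pvNt (cs : List Char) (i : Int) : String := String.ofList [((PySem.List.pyGet? cs i).getD 'A')]
def pvMms (cs : List Char) (i : Int) : List String := ["A", "C", "G", "T"].filter (fun j => j != pvNt cs i)
def pvMk (cs : List Char) (i : Int) (mm : String) : String :=
  String.ofList (PySem.List.slice cs none (some i) ++ mm.toList ++ PySem.List.slice cs (some (i + 1)) none)
def pvRow (cs : List Char) (i : Int) : List (String × Int × String × String) :=
  (pvMms cs i).map (fun mm => (pvMk cs i mm, i, pvNt cs i, mm))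

-- B is the flat concatenation of the rows
theorem alt_eq_flatMap (kmer : String) (io : Bool) :
    get_all_mismatches_alt kmer io
      = (PySem.List.pyRange (if io then 1 else 0)
          (if io then (kmer.toList.length : Int) - 1 else (kmer.toList.length : Int)) 1).flatMap
          (pvRow kmer.toList) := by
  unfold get_all_mismatches_alt
  dsimp only
  refine (PySem.List.foldl_congr_mem _ _ (fun out i => out ++ pvRow kmer.toList i) _ ?_).trans ?_
  · intro acc i _
    rw [PySem.List.foldl_append_if]
    rfl
  · rw [PySem.List.foldl_append_eq_flatMap]
    rfl

-- a fold that sets strictly positive indices leaves the head alone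
theorem foldl_pySetD_cons {α : Type} (g : Int → α) (a : Int) :
    ∀ (l : List Int) (y : α) (t : List α), (∀ i ∈ l, a + 1 ≤ i) →
    l.foldl (fun s i => PySem.List.pySetD s (i - a) (g i)) (y :: t)
      = y :: l.foldl (fun s i => PySem.List.pySetD s (i - (a + 1)) (g i)) t := by
  intro l
  induction l with
  | nil => intro y t _; rfl
  | cons i l ih =>
    intro y t h
    have h1 : (1 : Int) ≤ i - a := by have := h i (by simp); omega
    simp only [List.foldl_cons]
    rw [PySem.List.pySetD_of_nonneg _ _ (show (0 : Int) ≤ i - a by omega)]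
    have h2 : (i - a).toNat = (i - (a + 1)).toNat + 1 := by omega
    rw [h2, List.set_cons_succ,
        ← PySem.List.pySetD_of_nonneg _ _ (show (0 : Int) ≤ i - (a + 1) by omega)]
    exact ih _ _ (fun j hj => h j (by simp [hj]))

-- filling a pre-allocated list slot by slot over range(a, a+m) produces the map
theorem foldl_pySetD_fill {α : Type} (g : Int → α) :
    ∀ (m : Nat) (a : Int) (st : List α), st.length = m →
    (PySem.List.pyRange a (a + m) 1).foldl (fun s i => PySem.List.pySetD s (i - a) (g i)) st
      = (PySem.List.pyRange a (a + m) 1).map g := by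
  intro m
  induction m with
  | zero =>
    intro a st h
    rw [show a + ((0 : Nat) : Int) = a by simp, PySem.List.pyRange_one_eq_nil (le_refl a)]
    simpa using List.eq_nil_of_length_eq_zero h
  | succ m ih =>
    intro a st h
    obtain ⟨y, t, rfl⟩ : ∃ y t, st = y :: t := by
      cases st with
      | nil => simp at h
      | cons y t => exact ⟨y, t, rfl⟩
    have hab : a < a + ((m + 1 : Nat) : Int) := by push_cast; omega
    rw [PySem.List.pyRange_one_cons hab]
    simp only [List.foldl_cons, List.map_cons]
    rw [PySem.List.pySetD_of_nonneg _ _ (show (0 : Int) ≤ a - a by omega)]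
    have hz : (a - a).toNat = 0 := by omega
    rw [hz, List.set_cons_zero]
    have hb : a + ((m + 1 : Nat) : Int) = (a + 1) + (m : Int) := by push_cast; ring
    rw [hb, foldl_pySetD_cons g a _ _ _
          (fun i hi => (PySem.List.mem_pyRange_one.mp hi).1),
        ih (a + 1) t (by simpa using h)]

-- A's loop over the 4-tuple of pre-allocated columns is four map-producing fills
theorem quad_fold {α β γ δ : Type} (fK : Int → α) (fP : Int → β) (fN : Int → γ) (fM : Int → δ)
    (dK : α) (dP : β) (dN : γ) (dM : δ) (a : Int) (m : Nat) :
    (PySem.List.pyRange a (a + m) 1).foldl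
      (fun s i => (PySem.List.pySetD s.1 (i - a) (fK i),
                   PySem.List.pySetD s.2.1 (i - a) (fP i),
                   PySem.List.pySetD s.2.2.1 (i - a) (fN i),
                   PySem.List.pySetD s.2.2.2 (i - a) (fM i)))
      (List.replicate m dK, List.replicate m dP, List.replicate m dN, List.replicate m dM)
    = ((PySem.List.pyRange a (a + m) 1).map fK, (PySem.List.pyRange a (a + m) 1).map fP,
       (PySem.List.pyRange a (a + m) 1).map fN, (PySem.List.pyRange a (a + m) 1).map fM) := by
  rw [PySem.List.foldl_prod_mk
        (f := fun s1 i => PySem.List.pySetD s1 (i - a) (fK i))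
        (g := fun s2 i => (PySem.List.pySetD s2.1 (i - a) (fP i),
                           PySem.List.pySetD s2.2.1 (i - a) (fN i),
                           PySem.List.pySetD s2.2.2 (i - a) (fM i))),
      PySem.List.foldl_prod_mk
        (f := fun s1 i => PySem.List.pySetD s1 (i - a) (fP i))
        (g := fun s2 i => (PySem.List.pySetD s2.1 (i - a) (fN i),
                           PySem.List.pySetD s2.2 (i - a) (fM i))),
      PySem.List.foldl_prod_mk
        (f := fun s1 i => PySem.List.pySetD s1 (i - a) (fN i))
        (g := fun s2 i => PySem.List.pySetD s2 (i - a) (fM i)),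
      foldl_pySetD_fill fK m a _ (List.length_replicate),
      foldl_pySetD_fill fP m a _ (List.length_replicate),
      foldl_pySetD_fill fN m a _ (List.length_replicate),
      foldl_pySetD_fill fM m a _ (List.length_replicate)]

-- zip of four concatenations is the concatenation of the rowwise zips (equal row lengths)
theorem zip4_flatMap {α β γ δ : Type} (rK : Int → List α) (rP : Int → List β)
    (rN : Int → List γ) (rM : Int → List δ) :
    ∀ (R : List Int),
    (∀ i ∈ R, (rP i).length = (rK i).length ∧ (rN i).length = (rK i).length ∧
              (rM i).length = (rK i).length) →
    (R.flatMap rK).zip ((R.flatMap rP).zip ((R.flatMap rN).zip (R.flatMap rM)))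
      = R.flatMap (fun i => (rK i).zip ((rP i).zip ((rN i).zip (rM i)))) := by
  intro R
  induction R with
  | nil => intro _; rfl
  | cons i R ih =>
    intro h
    obtain ⟨hP, hN, hM⟩ := h i (by simp)
    have l1 : ((rN i).zip (rM i)).length = (rK i).length := by
      rw [List.length_zip, hN, hM]; omega
    have l2 : ((rP i).zip ((rN i).zip (rM i))).length = (rK i).length := by
      rw [List.length_zip, hP, l1]; omega
    simp only [List.flatMap_cons]
    rw [List.zip_append (hN.trans hM.symm), List.zip_append (hP.trans l1.symm),
        List.zip_append l2.symm, ih (fun j hj => h j (by simp [hj]))]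

-- zip of four maps over the same list is a map of the 4-tuple
theorem zip4_map {α β γ δ ε : Type} (f : α → β) (p : α → γ) (n : α → δ) (m : α → ε) :
    ∀ (l : List α),
    (l.map f).zip ((l.map p).zip ((l.map n).zip (l.map m)))
      = l.map (fun x => (f x, p x, n x, m x)) := by
  intro l; induction l with
  | nil => rfl
  | cons x l ih => simp [ih]

-- the four column entries A stores at slot i
def pvColK (cs : List Char) (i : Int) : Option (List String) := some ((pvMms cs i).map (fun mm => pvMk cs i mm))
def pvColP (cs : List Char) (i : Int) : Option (List Int) := some ((pvMms cs i).map (fun _ => i))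
def pvColN (cs : List Char) (i : Int) : Option (List String) := some ((pvMms cs i).map (fun _ => pvNt cs i))
def pvColM (cs : List Char) (i : Int) : Option (List String) := some ((pvMms cs i).map (fun mm => mm))

-- the zip of the four flattened columns over any range is the flat row list
theorem zip_cols_eq_rows (cs : List Char) (R : List Int) :
    ((R.map (pvColK cs)).flatMap (fun o => o.getD [])).zip
      (((R.map (pvColP cs)).flatMap (fun o => o.getD [])).zip
        (((R.map (pvColN cs)).flatMap (fun o => o.getD [])).zip
          ((R.map (pvColM cs)).flatMap (fun o => o.getD []))))
      = R.flatMap (pvRow cs) := by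
  rw [List.flatMap_map, List.flatMap_map, List.flatMap_map, List.flatMap_map,
      zip4_flatMap _ _ _ _ R
        (by intro i _; simp [pvColK, pvColP, pvColN, pvColM])]
  refine List.flatMap_congr ?_
  intro i _
  simp only [pvColK, pvColP, pvColN, pvColM, Option.getD_some, zip4_map]
  rfl

-- A is the same flat concatenation of rows
theorem main_eq_flatMap (kmer : String) (io : Bool) :
    get_all_mismatches kmer io
      = (PySem.List.pyRange (if io then 1 else 0)
          (if io then (kmer.toList.length : Int) - 1 else (kmer.toList.length : Int)) 1).flatMap
          (pvRow kmer.toList) := by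
  unfold get_all_mismatches
  generalize kmer.toList = cs
  cases io with
  | false =>
    simp only [Bool.false_eq_true, if_false]
    rw [PySem.List.foldl_congr_mem _ _
          (fun s i => (PySem.List.pySetD s.1 (i - 0) (pvColK cs i),
                       PySem.List.pySetD s.2.1 (i - 0) (pvColP cs i),
                       PySem.List.pySetD s.2.2.1 (i - 0) (pvColN cs i),
                       PySem.List.pySetD s.2.2.2 (i - 0) (pvColM cs i))) _
          (by intro acc i _
              simp [pvColK, pvColP, pvColN, pvColM, pvMms, pvMk, pvNt])]
    rw [show ((cs.length : Int)) = 0 + ((cs.length : Nat) : Int) from by omega]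
    rw [show ((0 : Int) + ((cs.length : Nat) : Int)).toNat = cs.length from by omega]
    rw [quad_fold (pvColK cs) (pvColP cs) (pvColN cs) (pvColM cs) none none none none 0 cs.length]
    dsimp only
    exact zip_cols_eq_rows cs _
  | true =>
    simp only [if_true]
    by_cases hn : 2 ≤ cs.length
    · rw [PySem.List.foldl_congr_mem _ _
            (fun s i => (PySem.List.pySetD s.1 (i - 1) (pvColK cs i),
                         PySem.List.pySetD s.2.1 (i - 1) (pvColP cs i),
                         PySem.List.pySetD s.2.2.1 (i - 1) (pvColN cs i),
                         PySem.List.pySetD s.2.2.2 (i - 1) (pvColM cs i))) _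
            (by intro acc i _
                simp [pvColK, pvColP, pvColN, pvColM, pvMms, pvMk, pvNt, Int.sub_eq_add_neg])]
      rw [show ((cs.length : Int)) - 1 = 1 + ((cs.length - 2 : Nat) : Int) from by omega]
      rw [show ((cs.length : Int)) - 2 = ((cs.length - 2 : Nat) : Int) from by omega]
      rw [show (((cs.length - 2 : Nat) : Int)).toNat = cs.length - 2 from by omega]
      rw [quad_fold (pvColK cs) (pvColP cs) (pvColN cs) (pvColM cs) none none none none 1 (cs.length - 2)]
      dsimp only
      exact zip_cols_eq_rows cs _
    · rw [PySem.List.pyRange_one_eq_nil (show (cs.length : Int) - 1 ≤ 1 by omega)]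
      rw [show ((cs.length : Int) - 2).toNat = 0 from by omega]
      simp

-- ===== VERDICT (by name: the statement is the Claim_ definition above) =====
theorem get_all_mismatches_spec : Claim_equal_get_all_mismatches := by
  intro kmer io _
  unfold Spec_get_all_mismatches
  rw [main_eq_flatMap, alt_eq_flatMap]
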